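-- pv_equiv track=rewrite | github.com/rookinc/hyperxi_lab | scripts/quotient_base_graph_by_opposition.py | build_base_graph
-- ===== SOURCE A (Python) =====
-- def build_base_graph(edges):
--     """
--     30-vertex graph on icosahedral edges:
--     adjacency = share a vertex
--     """
--     adj = {e: set() for e in edges}
--     for a in edges:
--         sa = set(a)
--         for b in edges:
--             if a == b:
--                 continue
--             if len(sa & set(b)) == 1:
--                 adj[a].add(b)
--     return adj
-- ===== SOURCE B (Python) =====
-- def build_base_graph(edges):
--     """
--     30-vertex graph on icosahedral edges:
--     adjacency = share a vertex
--     (vertex-bucket index + two-pointer symmetric-difference merge instead of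
--     the all-pairs scan)
--     """
--     # distinct edges in first-occurrence order, with their index
--     order = []
--     index = {}
--     for e in edges:
--         if e not in index:
--             index[e] = len(order)
--             order.append(e)
--     # bucket: vertex -> sorted list of indices of edges containing it
--     buckets = {}
--     for i, e in enumerate(order):
--         for v in ({e[0]} if e[0] == e[1] else (e[0], e[1])):
--             buckets.setdefault(v, []).append(i)
--     adj = {}
--     for i, e in enumerate(order):
--         if e[0] == e[1]:
--             # a loop edge shares exactly its one vertex with any other edge on it
--             nbrs = [j for j in buckets[e[0]] if j != i]
--         else:
--             # indices in exactly one of the two buckets share exactly one vertex;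
--             # e itself sits in both buckets and drops out automatically
--             nbrs = _sym_diff(buckets[e[0]], buckets[e[1]])
--         adj[e] = {order[j] for j in nbrs}
--     return adj
--
--
-- def _sym_diff(xs, ys):
--     """symmetric difference of two strictly increasing int lists, merged"""
--     out = []
--     i = j = 0
--     while i < len(xs) and j < len(ys):
--         if xs[i] == ys[j]:
--             i += 1
--             j += 1
--         elif xs[i] < ys[j]:
--             out.append(xs[i])
--             i += 1
--         else:
--             out.append(ys[j])
--             j += 1
--     out.extend(xs[i:])
--     out.extend(ys[j:])
--     return out
-- ===== Notes on version B (the rewrite author's own statement) =====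
-- stated objective: faster
-- what changed: A tests every ordered pair of edges for a shared vertex (O(E^2)); B builds one index from each vertex to the (index-sorted) list of edges containing it and reads each edge's neighbours off its one or two vertex buckets with a two-pointer symmetric-difference merge, so no pairwise scan remains.
import Mathlib
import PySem

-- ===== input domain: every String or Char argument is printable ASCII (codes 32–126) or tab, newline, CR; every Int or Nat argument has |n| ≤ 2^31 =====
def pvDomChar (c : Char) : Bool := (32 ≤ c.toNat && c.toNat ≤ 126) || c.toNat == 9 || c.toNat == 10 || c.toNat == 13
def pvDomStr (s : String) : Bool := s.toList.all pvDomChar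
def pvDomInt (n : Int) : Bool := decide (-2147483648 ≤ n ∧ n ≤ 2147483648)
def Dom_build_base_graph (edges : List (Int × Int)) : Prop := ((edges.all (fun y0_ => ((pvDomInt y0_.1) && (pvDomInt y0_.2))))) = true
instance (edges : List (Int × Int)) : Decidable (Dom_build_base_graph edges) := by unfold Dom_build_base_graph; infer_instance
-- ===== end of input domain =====

-- B replaces A's all-pairs O(E^2) scan by a per-vertex bucket index: edges adjacent to an
-- edge are read off the (sorted-by-index) buckets of its one or two vertices with a
-- two-pointer symmetric-difference merge.

-- ===== PORT A =====
def build_base_graph (edges : List (Int × Int)) : List (Int × Int × List (Int × Int)) :=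
  -- adj = {e: set() for e in edges}
  let adj0 : PySem.Dict (Int × Int) (PySem.Set (Int × Int)) :=
    edges.foldl (fun d e => d.insert e PySem.Set.empty) PySem.Dict.empty
  -- for a in edges: … for b in edges: …
  let adj := edges.foldl (fun adj a =>
      let sa := PySem.Set.ofList [a.1, a.2]
      edges.foldl (fun adj b =>
        if a == b then adj
        else if PySem.Set.len (PySem.Set.inter sa (PySem.Set.ofList [b.1, b.2])) == 1 then
          -- adj[a].add(b); the key a is always present, so the modify default is never used
          adj.modify a PySem.Set.empty (fun s => PySem.Set.add s b)
        else adj) adj) adj0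
  adj.items.map (fun p => (p.1.1, p.1.2, p.2))

-- ===== PORT B =====
-- two-pointer symmetric-difference merge of two strictly increasing int lists (_sym_diff in Source B)
def pvSymDiff : List Int → List Int → List Int
  | [], ys => ys
  | x :: xs, [] => x :: xs
  | x :: xs, y :: ys =>
    if x = y then pvSymDiff xs ys
    else if x < y then x :: pvSymDiff xs (y :: ys)
    else y :: pvSymDiff (x :: xs) ys

def build_base_graph_alt (edges : List (Int × Int)) : List (Int × Int × List (Int × Int)) :=
  -- distinct edges in first-occurrence order, with their index dict
  let oi := edges.foldl
      (fun (p : List (Int × Int) × PySem.Dict (Int × Int) Int) e =>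
        if p.2.contains e then p else (p.1 ++ [e], p.2.insert e (p.1.length : Int)))
      ([], PySem.Dict.empty)
  let order := oi.1
  -- bucket: vertex -> indices of edges containing it (increasing)
  let buckets : PySem.Dict Int (List Int) :=
    (PySem.List.enumerate order 0).foldl (fun d ie =>
      (if ie.2.1 = ie.2.2 then [ie.2.1] else [ie.2.1, ie.2.2]).foldl
        (fun d v => d.modify v [] (fun l => l ++ [ie.1])) d) PySem.Dict.empty
  let adj : PySem.Dict (Int × Int) (PySem.Set (Int × Int)) := (PySem.List.enumerate order 0).foldl (fun d ie =>
      let nbrs :=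
        if ie.2.1 = ie.2.2 then
          (buckets.getD ie.2.1 []).filter (fun j => j != ie.1)
        else
          pvSymDiff (buckets.getD ie.2.1 []) (buckets.getD ie.2.2 [])
      d.insert ie.2 (PySem.Set.ofList (nbrs.map (fun j => PySem.List.pyGetD order j (0, 0)))))
    PySem.Dict.empty
  adj.items.map (fun p => (p.1.1, p.1.2, p.2))

-- ===== PRECONDITION & SPEC =====
def Spec_build_base_graph (edges : List (Int × Int)) (out : List (Int × Int × List (Int × Int))) : Prop := out = build_base_graph_alt edges
instance (edges : List (Int × Int)) (out : List (Int × Int × List (Int × Int))) : Decidable (Spec_build_base_graph edges out) := by unfold Spec_build_base_graph; infer_instance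

-- ===== CLAIM (what is proved, stated in full; the proofs are below) =====
def Claim_equal_build_base_graph : Prop := ∀ (edges : List (Int × Int)), Dom_build_base_graph edges → Spec_build_base_graph edges (build_base_graph edges)

-- ===== LEMMAS AND PROOFS =====

-- A's adjacency test as a Bool predicate
def pvAdjP (a b : Int × Int) : Bool :=
  !(a == b) && (PySem.Set.len (PySem.Set.inter (PySem.Set.ofList [a.1, a.2]) (PySem.Set.ofList [b.1, b.2])) == 1)

-- the common normal form both ports are reduced to
def pvTarget (edges : List (Int × Int)) : List (Int × Int × List (Int × Int)) :=
  (PySem.Set.ofList edges).map (fun a => (a.1, a.2, (PySem.Set.ofList edges).filter (pvAdjP a)))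

-- the value A accumulates at key a, as a fold over the inner loop's list
def pvInnerSet (a : Int × Int) (l : List (Int × Int)) (s : PySem.Set (Int × Int)) : PySem.Set (Int × Int) :=
  l.foldl (fun s b => if pvAdjP a b then PySem.Set.add s b else s) s

theorem pvA0 (l : List (Int × Int)) (d : PySem.Dict (Int × Int) (PySem.Set (Int × Int))) (x : Int × Int)
    (h : d.getD x PySem.Set.empty = PySem.Set.empty) :
    (l.foldl (fun d e => d.insert e PySem.Set.empty) d).getD x PySem.Set.empty = PySem.Set.empty := by
  induction l generalizing d with
  | nil => simpa using h
  | cons e t ih =>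
    simp only [List.foldl_cons]
    apply ih
    rw [PySem.Dict.getD_insert]
    split_ifs
    · rfl
    · exact h

theorem pvInnerGetD (a : Int × Int) (l : List (Int × Int))
    (d : PySem.Dict (Int × Int) (PySem.Set (Int × Int))) (e : Int × Int) :
    (l.foldl (fun adj b => if pvAdjP a b then adj.modify a PySem.Set.empty (fun s => PySem.Set.add s b) else adj) d).getD e PySem.Set.empty
      = if e = a then pvInnerSet a l (d.getD a PySem.Set.empty) else d.getD e PySem.Set.empty := by
  induction l generalizing d with
  | nil =>
    simp only [List.foldl_nil, pvInnerSet]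
    by_cases he : e = a <;> simp [he]
  | cons b t ih =>
    simp only [List.foldl_cons]
    by_cases hp : pvAdjP a b
    · rw [if_pos hp, ih]
      simp only [PySem.Dict.getD_modify]
      by_cases he : e = a
      · subst he; simp [pvInnerSet, hp]
      · simp [he]
    · rw [if_neg hp, ih]
      by_cases he : e = a
      · subst he; simp [pvInnerSet, hp]
      · simp [he]

theorem pvInnerContains (a : Int × Int) (l : List (Int × Int))
    (d : PySem.Dict (Int × Int) (PySem.Set (Int × Int))) (x : Int × Int) (h : d.contains x = true) :
    (l.foldl (fun adj b => if pvAdjP a b then adj.modify a PySem.Set.empty (fun s => PySem.Set.add s b) else adj) d).contains x = true := by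
  induction l generalizing d with
  | nil => simpa using h
  | cons b t ih =>
    simp only [List.foldl_cons]
    apply ih
    split_ifs
    · rw [PySem.Dict.contains_modify]; simp [h]
    · exact h

theorem pvInnerKeys (a : Int × Int) (l : List (Int × Int))
    (d : PySem.Dict (Int × Int) (PySem.Set (Int × Int))) (h : d.contains a = true) :
    (l.foldl (fun adj b => if pvAdjP a b then adj.modify a PySem.Set.empty (fun s => PySem.Set.add s b) else adj) d).keys = d.keys := by
  induction l generalizing d with
  | nil => rfl
  | cons b t ih =>
    simp only [List.foldl_cons]
    by_cases hp : pvAdjP a b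
    · rw [if_pos hp]
      rw [ih _ (by rw [PySem.Dict.contains_modify]; simp [h])]
      rw [PySem.Dict.keys_modify, PySem.Dict.keys_insert_of_contains _ _ h]
    · rw [if_neg hp]; exact ih _ h

-- adding only elements already present is a no-op
theorem pvInnerSet_noop (a : Int × Int) (l : List (Int × Int)) (s : PySem.Set (Int × Int))
    (h : ∀ b ∈ l, pvAdjP a b = true → b ∈ s) : pvInnerSet a l s = s := by
  induction l with
  | nil => rfl
  | cons b t ih =>
    simp only [pvInnerSet, List.foldl_cons]
    by_cases hp : pvAdjP a b
    · rw [if_pos hp, PySem.Set.add_of_mem (h b (by simp) hp)]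
      exact ih (fun b' hb' => h b' (by simp [hb']))
    · rw [if_neg hp]
      exact ih (fun b' hb' => h b' (by simp [hb']))

theorem pvInnerSet_empty (a : Int × Int) (l : List (Int × Int)) :
    pvInnerSet a l PySem.Set.empty = PySem.Set.ofList (l.filter (pvAdjP a)) := by
  rw [pvInnerSet, PySem.List.foldl_if_eq_foldl_filter, PySem.Set.ofList_eq_foldl]
  rfl

theorem pvInnerSet_idem (a : Int × Int) (l : List (Int × Int)) :
    pvInnerSet a l (pvInnerSet a l PySem.Set.empty) = pvInnerSet a l PySem.Set.empty := by
  apply pvInnerSet_noop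
  intro b hb hp
  rw [pvInnerSet_empty, PySem.Set.mem_ofList, List.mem_filter]
  exact ⟨hb, hp⟩

theorem pvOuterGetD (edges l : List (Int × Int)) (d : PySem.Dict (Int × Int) (PySem.Set (Int × Int)))
    (e : Int × Int)
    (hc : ∀ x ∈ l, d.contains x = true)
    (hv : d.getD e PySem.Set.empty = PySem.Set.empty ∨
          d.getD e PySem.Set.empty = pvInnerSet e edges PySem.Set.empty) :
    (l.foldl (fun adj a => edges.foldl (fun adj b => if pvAdjP a b then adj.modify a PySem.Set.empty (fun s => PySem.Set.add s b) else adj) adj) d).getD e PySem.Set.empty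
      = if e ∈ l then pvInnerSet e edges PySem.Set.empty else d.getD e PySem.Set.empty := by
  induction l generalizing d with
  | nil => simp
  | cons a t ih =>
    simp only [List.foldl_cons]
    have hc' : ∀ x ∈ t, (edges.foldl (fun adj b => if pvAdjP a b then adj.modify a PySem.Set.empty (fun s => PySem.Set.add s b) else adj) d).contains x = true :=
      fun x hx => pvInnerContains a edges d x (hc x (by simp [hx]))
    by_cases he : e = a
    · subst he
      have hval : (edges.foldl (fun adj b => if pvAdjP e b then adj.modify e PySem.Set.empty (fun s => PySem.Set.add s b) else adj) d).getD e PySem.Set.empty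
          = pvInnerSet e edges PySem.Set.empty := by
        rw [pvInnerGetD, if_pos rfl]
        rcases hv with hv | hv
        · rw [hv]
        · rw [hv, pvInnerSet_idem]
      rw [ih _ hc' (Or.inr hval)]
      by_cases hm : e ∈ t
      · rw [if_pos hm, if_pos (List.mem_cons_self)]
      · rw [if_neg hm, if_pos (List.mem_cons_self), hval]
    · have hval : (edges.foldl (fun adj b => if pvAdjP a b then adj.modify a PySem.Set.empty (fun s => PySem.Set.add s b) else adj) d).getD e PySem.Set.empty
          = d.getD e PySem.Set.empty := by
        rw [pvInnerGetD, if_neg he]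
      rw [ih _ hc' (by rw [hval]; exact hv)]
      by_cases hm : e ∈ t
      · rw [if_pos hm, if_pos (List.mem_cons_of_mem _ hm)]
      · rw [if_neg hm, if_neg (by simp [he, hm]), hval]

theorem pvOuterKeys (edges l : List (Int × Int)) (d : PySem.Dict (Int × Int) (PySem.Set (Int × Int)))
    (hc : ∀ x ∈ l, d.contains x = true) :
    (l.foldl (fun adj a => edges.foldl (fun adj b => if pvAdjP a b then adj.modify a PySem.Set.empty (fun s => PySem.Set.add s b) else adj) adj) d).keys = d.keys := by
  induction l generalizing d with
  | nil => rfl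
  | cons a t ih =>
    simp only [List.foldl_cons]
    rw [ih _ (fun x hx => pvInnerContains a edges d x (hc x (by simp [hx])))]
    exact pvInnerKeys a edges d (hc a (by simp))

-- ofList commutes with filter
theorem pvOfListFilter (p : Int × Int → Bool) (xs : List (Int × Int)) :
    PySem.Set.ofList (xs.filter p) = (PySem.Set.ofList xs).filter p := by
  induction xs using List.reverseRecOn with
  | nil => rfl
  | append_singleton xs x ih =>
    have hof : ∀ (ys : List (Int × Int)) (y : Int × Int),
        PySem.Set.ofList (ys ++ [y]) = PySem.Set.add (PySem.Set.ofList ys) y := by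
      intro ys y
      simp [PySem.Set.ofList_eq_foldl, List.foldl_append]
    by_cases hp : p x
    · have hfx : List.filter p [x] = [x] := by simp [hp]
      rw [List.filter_append, hfx, hof, hof, ih]
      by_cases hm : x ∈ PySem.Set.ofList xs
      · rw [PySem.Set.add_of_mem hm,
          PySem.Set.add_of_mem (by rw [List.mem_filter]; exact ⟨hm, hp⟩)]
      · rw [PySem.Set.add_of_not_mem hm,
          PySem.Set.add_of_not_mem (fun h => hm (List.mem_filter.mp h).1),
          List.filter_append, hfx]
    · have hfx : List.filter p [x] = [] := by simp [hp]
      rw [List.filter_append, hfx, List.append_nil, hof, ih]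
      by_cases hm : x ∈ PySem.Set.ofList xs
      · rw [PySem.Set.add_of_mem hm]
      · rw [PySem.Set.add_of_not_mem hm, List.filter_append, hfx, List.append_nil]

theorem pv_A_eq_target (edges : List (Int × Int)) : build_base_graph edges = pvTarget edges := by
  unfold build_base_graph
  simp only []
  -- rewrite the inner step to the merged-predicate form
  have hstep : (fun (adj : PySem.Dict (Int × Int) (PySem.Set (Int × Int))) (a : Int × Int) =>
        edges.foldl (fun adj b =>
          if a == b then adj
          else if PySem.Set.len (PySem.Set.inter (PySem.Set.ofList [a.1, a.2]) (PySem.Set.ofList [b.1, b.2])) == 1 then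
            adj.modify a PySem.Set.empty (fun s => PySem.Set.add s b)
          else adj) adj)
      = (fun adj a => edges.foldl (fun adj b => if pvAdjP a b then adj.modify a PySem.Set.empty (fun s => PySem.Set.add s b) else adj) adj) := by
    funext adj a
    congr 1
    funext adj b
    by_cases h1 : a == b
    · simp [pvAdjP, h1]
    · by_cases h2 : PySem.Set.len (PySem.Set.inter (PySem.Set.ofList [a.1, a.2]) (PySem.Set.ofList [b.1, b.2])) == 1 <;>
        simp [pvAdjP, h1, h2]
  rw [hstep]
  have hkeys0 : (edges.foldl (fun d e => d.insert e PySem.Set.empty) (PySem.Dict.empty : PySem.Dict (Int × Int) (PySem.Set (Int × Int)))).keys = PySem.Set.ofList edges := by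
    rw [PySem.Dict.keys_foldl_insert (f := fun _ _ => PySem.Set.empty)]
    rw [PySem.Dict.keys_empty, PySem.Set.update_nil_left]
  have hcont0 : ∀ x ∈ edges, (edges.foldl (fun d e => d.insert e PySem.Set.empty) (PySem.Dict.empty : PySem.Dict (Int × Int) (PySem.Set (Int × Int)))).contains x = true := by
    intro x hx
    rw [PySem.Dict.contains_iff_mem_keys, hkeys0, PySem.Set.mem_ofList]
    exact hx
  have hgetD0 : ∀ x, (edges.foldl (fun d e => d.insert e PySem.Set.empty) (PySem.Dict.empty : PySem.Dict (Int × Int) (PySem.Set (Int × Int)))).getD x PySem.Set.empty = PySem.Set.empty := by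
    intro x
    exact pvA0 _ _ _ (by simp [PySem.Dict.getD_empty])
  have hkeys : (edges.foldl (fun adj a => edges.foldl (fun adj b => if pvAdjP a b then adj.modify a PySem.Set.empty (fun s => PySem.Set.add s b) else adj) adj) (edges.foldl (fun d e => d.insert e PySem.Set.empty) PySem.Dict.empty)).keys = PySem.Set.ofList edges := by
    rw [pvOuterKeys _ _ _ hcont0, hkeys0]
  rw [PySem.Dict.items_eq_map_keys _ (by rw [hkeys]; exact PySem.Set.nodup_ofList edges) PySem.Set.empty, hkeys]
  unfold pvTarget
  rw [List.map_map]
  apply List.map_congr_left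
  intro a ha
  have hval := pvOuterGetD edges edges _ a hcont0 (Or.inl (hgetD0 a))
  rw [if_pos (by rwa [PySem.Set.mem_ofList] at ha)] at hval
  simp only [Function.comp_apply, hval, pvInnerSet_empty, pvOfListFilter]

-- ---- B-side ----
def pvIncB (v : Int) (e : Int × Int) : Bool := decide (v = e.1) || decide (v = e.2)

theorem pvOrderFold (l acc : List (Int × Int)) (d : PySem.Dict (Int × Int) Int)
    (h : ∀ x, d.contains x = true ↔ x ∈ acc) :
    (l.foldl (fun (p : List (Int × Int) × PySem.Dict (Int × Int) Int) e =>
        if p.2.contains e then p else (p.1 ++ [e], p.2.insert e (p.1.length : Int))) (acc, d)).1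
      = PySem.Set.update acc l := by
  induction l generalizing acc d with
  | nil => rfl
  | cons e t ih =>
    simp only [List.foldl_cons]
    by_cases hc : e ∈ acc
    · rw [if_pos (by rw [h]; exact hc)]
      rw [ih acc d h]
      have : PySem.Set.add acc e = acc := PySem.Set.add_of_mem hc
      simp only [PySem.Set.update, List.foldl_cons, this]
    · rw [if_neg (by rw [h]; exact hc)]
      rw [ih (acc ++ [e]) _ (by
        intro x
        rw [PySem.Dict.contains_insert, Bool.or_eq_true, beq_iff_eq, h]
        simp [or_comm])]
      have : PySem.Set.add acc e = acc ++ [e] := PySem.Set.add_of_not_mem hc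
      simp only [PySem.Set.update, List.foldl_cons, this]

theorem pvFoldlAddAppend (l acc : List (Int × Int)) (h : (acc ++ l).Nodup) :
    l.foldl PySem.Set.add acc = acc ++ l := by
  induction l generalizing acc with
  | nil => simp
  | cons e t ih =>
    simp only [List.foldl_cons]
    have hne : e ∉ acc := by
      intro hmem
      have := List.disjoint_of_nodup_append h
      exact this hmem (by simp)
    rw [PySem.Set.add_of_not_mem hne, ih (acc ++ [e]) (by simpa using h)]
    simp

theorem pvOfListNodup (l : List (Int × Int)) (h : l.Nodup) : PySem.Set.ofList l = l := by
  rw [PySem.Set.ofList_eq_foldl]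
  simpa using pvFoldlAddAppend l [] (by simpa using h)

theorem pvBucketFold (l : List (Int × (Int × Int))) (d : PySem.Dict Int (List Int)) :
    l.foldl (fun d ie =>
        (if ie.2.1 = ie.2.2 then [ie.2.1] else [ie.2.1, ie.2.2]).foldl
          (fun d v => d.modify v [] (fun li => li ++ [ie.1])) d) d
      = (l.flatMap (fun ie => (if ie.2.1 = ie.2.2 then [ie.2.1] else [ie.2.1, ie.2.2]).map (fun v => (v, ie.1)))).foldl
          (fun d p => d.modify p.1 [] (fun li => li ++ [p.2])) d := by
  induction l generalizing d with
  | nil => rfl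
  | cons ie t ih =>
    simp only [List.foldl_cons, List.flatMap_cons, List.foldl_append, List.foldl_map, ih]

theorem pvPairsHead (e : Int × Int) (i v : Int) :
    (((if e.1 = e.2 then [e.1] else [e.1, e.2]).map (fun w => (w, i))).filter (fun p => p.1 == v)).map (fun p => p.2)
      = if pvIncB v e then [i] else [] := by
  obtain ⟨x, y⟩ := e
  by_cases h12 : x = y
  · subst h12
    by_cases h1 : v = x <;> simp [pvIncB, h1, beq_iff_eq, Ne.symm]
  · by_cases h1 : v = x <;> by_cases h2 : v = y <;>
      simp [pvIncB, h1, h2, h12, beq_iff_eq, Ne.symm]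

theorem pvBucketGetD (l : List (Int × (Int × Int))) (v : Int) :
    (l.foldl (fun d ie =>
        (if ie.2.1 = ie.2.2 then [ie.2.1] else [ie.2.1, ie.2.2]).foldl
          (fun d v => d.modify v [] (fun li => li ++ [ie.1])) d) PySem.Dict.empty).getD v []
      = (l.filter (fun ie => pvIncB v ie.2)).map (fun ie => ie.1) := by
  rw [pvBucketFold, PySem.Dict.getD_foldl_modify_append]
  rw [PySem.Dict.getD_empty]
  simp only [List.nil_append]
  induction l with
  | nil => rfl
  | cons ie t ih =>
    simp only [List.flatMap_cons, List.filter_append, List.map_append, ih, List.filter_cons]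
    rw [pvPairsHead]
    by_cases hv : pvIncB v ie.2 <;> simp [hv]

theorem pvSymDiff_nil_right (X : List Int) : pvSymDiff X [] = X := by
  cases X <;> simp [pvSymDiff]

theorem pvSymDiff_cons_left (x : Int) (X Y : List Int) (h : ∀ y ∈ Y, x < y) :
    pvSymDiff (x :: X) Y = x :: pvSymDiff X Y := by
  cases Y with
  | nil => rw [pvSymDiff_nil_right, pvSymDiff_nil_right]
  | cons y ys =>
    have hxy := h y (by simp)
    rw [pvSymDiff, if_neg (by omega), if_pos hxy]

theorem pvSymDiff_cons_right (y : Int) (X Y : List Int) (h : ∀ x ∈ X, y < x) :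
    pvSymDiff X (y :: Y) = y :: pvSymDiff X Y := by
  cases X with
  | nil => simp [pvSymDiff]
  | cons x xs =>
    have hxy := h x (by simp)
    rw [pvSymDiff, if_neg (by omega), if_neg (by omega)]

theorem pvSymDiffFilter (p q : Int × (Int × Int) → Bool) (E : List (Int × (Int × Int)))
    (h : E.Pairwise (fun a b => a.1 < b.1)) :
    pvSymDiff ((E.filter p).map (fun a => a.1)) ((E.filter q).map (fun a => a.1))
      = (E.filter (fun a => p a != q a)).map (fun a => a.1) := by
  induction E with
  | nil => simp [pvSymDiff]
  | cons a t ih =>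
    have hpc := List.pairwise_cons.mp h
    have ihr := ih hpc.2
    have hall : ∀ (r : Int × (Int × Int) → Bool) (y : Int), y ∈ (t.filter r).map (fun a => a.1) → a.1 < y := by
      intro r y hy
      obtain ⟨b, hb, rfl⟩ := List.mem_map.mp hy
      exact hpc.1 b (List.mem_of_mem_filter hb)
    simp only [List.filter_cons]
    by_cases hp : p a <;> by_cases hq : q a <;>
      simp only [hp, hq, if_pos, if_neg, Bool.true_eq_false, Bool.false_eq_true,
        reduceIte, List.map_cons, bne_self_eq_false, Bool.bne_false, Bool.false_bne,
        Bool.true_bne, Bool.bne_true, Bool.not_true, Bool.not_false]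
    · rw [pvSymDiff, if_pos rfl, ihr]
    · rw [pvSymDiff_cons_left _ _ _ (hall q), ihr]
    · rw [pvSymDiff_cons_right _ _ _ (hall p), ihr]
    · exact ihr

theorem pvIdxToEdge (O : List (Int × Int)) (r : Int × (Int × Int) → Bool) :
    (((PySem.List.enumerate O 0).filter r).map (fun a => a.1)).map (fun j => PySem.List.pyGetD O j (0, 0))
      = ((PySem.List.enumerate O 0).filter r).map (fun a => a.2) := by
  rw [List.map_map]
  apply List.map_congr_left
  intro a ha
  obtain ⟨k, hk, rfl⟩ := (PySem.List.mem_enumerate_iff _ _ _).mp (List.mem_of_mem_filter ha)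
  simp only [Function.comp_apply, zero_add, PySem.List.pyGetD_natCast]
  exact List.getD_eq_getElem _ _ hk

theorem pvFilterSnd (O : List (Int × Int)) (r : Int × (Int × Int) → Bool) (rb : Int × Int → Bool)
    (h : ∀ a, r a = rb a.2) :
    ((PySem.List.enumerate O 0).filter r).map (fun a => a.2) = O.filter rb := by
  conv_rhs => rw [← PySem.List.map_snd_enumerate O 0, List.filter_map]
  rw [List.filter_congr (fun a _ => h a)]
  rfl

set_option maxHeartbeats 1000000 in
theorem pvAdjP_loop (e b : Int × Int) (he : e.1 = e.2) :
    pvAdjP e b = ((b != e) && pvIncB e.1 b) := by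
  obtain ⟨x, y⟩ := e
  obtain ⟨u, w⟩ := b
  simp only at he
  subst he
  rw [Bool.eq_iff_iff]
  simp only [pvAdjP, pvIncB, PySem.Set.ofList, PySem.Set.add, PySem.Set.empty, PySem.Set.inter,
    PySem.Set.len, List.foldl_cons, List.foldl_nil, List.contains_eq_mem, List.mem_singleton,
    List.mem_cons, List.not_mem_nil, or_false, decide_eq_true_eq, List.filter_cons, List.filter_nil]
  by_cases h1 : x = u <;> by_cases h2 : x = w <;>
    split_ifs <;> simp_all [Prod.ext_iff, beq_iff_eq, bne_iff_ne] <;> omega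

set_option maxHeartbeats 1000000 in
theorem pvAdjP_nonloop (e b : Int × Int) (he : ¬ e.1 = e.2) :
    pvAdjP e b = (pvIncB e.1 b != pvIncB e.2 b) := by
  obtain ⟨x, y⟩ := e
  obtain ⟨u, w⟩ := b
  simp only at he
  rw [Bool.eq_iff_iff]
  simp only [pvAdjP, pvIncB, PySem.Set.ofList, PySem.Set.add, PySem.Set.empty, PySem.Set.inter,
    PySem.Set.len, List.foldl_cons, List.foldl_nil, List.contains_eq_mem, List.mem_singleton,
    List.mem_cons, List.not_mem_nil, or_false, decide_eq_true_eq, List.filter_cons, List.filter_nil]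
  by_cases h1 : x = u <;> by_cases h2 : x = w <;> by_cases h3 : y = u <;> by_cases h4 : y = w <;>
    split_ifs <;> simp_all [Prod.ext_iff, beq_iff_eq, bne_iff_ne] <;> omega

def pvBuckets (O : List (Int × Int)) : PySem.Dict Int (List Int) :=
  (PySem.List.enumerate O 0).foldl (fun d ie =>
    (if ie.2.1 = ie.2.2 then [ie.2.1] else [ie.2.1, ie.2.2]).foldl
      (fun d v => d.modify v [] (fun li => li ++ [ie.1])) d) PySem.Dict.empty

def pvValB (O : List (Int × Int)) (ie : Int × (Int × Int)) : PySem.Set (Int × Int) :=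
  PySem.Set.ofList
    ((if ie.2.1 = ie.2.2 then
        ((pvBuckets O).getD ie.2.1 []).filter (fun j => j != ie.1)
      else
        pvSymDiff ((pvBuckets O).getD ie.2.1 []) ((pvBuckets O).getD ie.2.2 [])).map
      (fun j => PySem.List.pyGetD O j (0, 0)))

theorem pvValB_eq (O : List (Int × Int)) (hO : O.Nodup) (k : Nat) (hk : k < O.length) :
    pvValB O ((k : Int), O[k]) = O.filter (pvAdjP O[k]) := by
  set e := O[k] with hedef
  unfold pvValB pvBuckets
  rw [pvBucketGetD (PySem.List.enumerate O 0) e.1]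
  by_cases hdiag : e.1 = e.2
  · rw [if_pos hdiag]
    rw [List.filter_map, List.filter_filter, pvIdxToEdge]
    have hcongr : ∀ a ∈ PySem.List.enumerate O 0,
        (((fun j => j != (k : Int)) ∘ fun a => a.1) a && pvIncB e.1 a.2)
          = ((fun b => (b != e) && pvIncB e.1 b) a.2) := by
      intro a ha
      obtain ⟨k', hk', rfl⟩ := (PySem.List.mem_enumerate_iff _ _ _).mp ha
      show (((fun j => j != (k : Int)) ∘ fun (a : Int × Int × Int) => a.1) (0 + (k' : Int), O[k']) && pvIncB e.1 O[k'])
          = ((O[k'] != e) && pvIncB e.1 O[k'])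
      simp only [Function.comp_apply, zero_add]
      congr 1
      by_cases hkk : k' = k
      · subst hkk
        rw [← hedef]
        simp
      · have hne : O[k'] ≠ e := by
          rw [hedef]
          exact fun hh => hkk ((List.Nodup.getElem_inj_iff hO).mp hh)
        have h1 : ((k' : Int) != (k : Int)) = true := by simp [hkk]
        have h2 : (O[k'] != e) = true := by simp [hne]
        rw [h1, h2]
    rw [List.filter_congr hcongr,
      pvFilterSnd O (fun a => (fun b => (b != e) && pvIncB e.1 b) a.2)
        (fun b => (b != e) && pvIncB e.1 b) (fun a => rfl)]
    rw [List.filter_congr (fun b _ => (pvAdjP_loop e b hdiag).symm)]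
    exact pvOfListNodup _ (hO.filter _)
  · rw [if_neg hdiag]
    rw [pvBucketGetD (PySem.List.enumerate O 0) e.2]
    rw [pvSymDiffFilter _ _ _ (PySem.List.pairwise_lt_enumerate O 0)]
    rw [pvIdxToEdge]
    rw [pvFilterSnd O (fun a => pvIncB e.1 a.2 != pvIncB e.2 a.2)
      (fun b => pvIncB e.1 b != pvIncB e.2 b) (fun a => rfl)]
    rw [List.filter_congr (fun b _ => (pvAdjP_nonloop e b hdiag).symm)]
    exact pvOfListNodup _ (hO.filter _)

theorem pv_B_eq_target (edges : List (Int × Int)) : build_base_graph_alt edges = pvTarget edges := by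
  unfold build_base_graph_alt
  simp only []
  rw [pvOrderFold edges [] PySem.Dict.empty (by intro x; simp [PySem.Dict.contains_empty]),
    PySem.Set.update_nil_left]
  show (((PySem.List.enumerate (PySem.Set.ofList edges) 0).foldl
      (fun d ie => d.insert ie.2 (pvValB (PySem.Set.ofList edges) ie))
      PySem.Dict.empty).items).map (fun p => (p.1.1, p.1.2, p.2)) = pvTarget edges
  have hO : (PySem.Set.ofList edges).Nodup := PySem.Set.nodup_ofList edges
  rw [PySem.Dict.items_foldl_insert_fresh _ (fun ie => ie.2) (pvValB (PySem.Set.ofList edges)) _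
    (by intro a _; exact PySem.Dict.contains_empty _)
    (by rw [PySem.List.map_snd_enumerate]; exact hO)]
  show (List.map _ (PySem.List.enumerate (PySem.Set.ofList edges) 0)).map _ = _
  rw [List.map_map]
  have hmc : (PySem.List.enumerate (PySem.Set.ofList edges) 0).map
        ((fun (p : (Int × Int) × List (Int × Int)) => (p.1.1, p.1.2, p.2)) ∘
          (fun a => (a.2, pvValB (PySem.Set.ofList edges) a)))
      = (PySem.List.enumerate (PySem.Set.ofList edges) 0).map
        ((fun a => (a.1, a.2, (PySem.Set.ofList edges).filter (pvAdjP a))) ∘ (fun x => x.2)) := by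
    apply List.map_congr_left
    intro ie hie
    obtain ⟨k, hk, rfl⟩ := (PySem.List.mem_enumerate_iff _ _ _).mp hie
    simp only [Function.comp_apply, zero_add]
    rw [pvValB_eq _ hO k hk]
  rw [hmc, ← List.map_map, PySem.List.map_snd_enumerate]
  rfl
-- ===== VERDICT (by name: the statement is the Claim_ definition above) =====
theorem build_base_graph_spec : Claim_equal_build_base_graph := by
  intro edges _
  unfold Spec_build_base_graph
  rw [pv_A_eq_target, pv_B_eq_target]
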